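-- pv_equiv track=rewrite | github.com/yaswanth8008/DSA | BinarySearch/10. Ath Magical Number.py | solve
-- ===== SOURCE A (Python) =====
-- def solve(A, B, C):
--     def gcd(a,b):
--         if b == 0:
--             return a
--         else:
--             return gcd(b,a%b)
--     def lcm(a,b):
--         return (a*b)//gcd(a,b)
--     def cnt_multiples(a,b,k):
--         return k//a + k//b - k//lcm(a,b)
--     s = min(B,C)
--     e = min(B,C)*A
--     while s <= e:
--         m = (s+e)//2
--         if cnt_multiples(B,C,m) > A:
--             e = m - 1
--         elif cnt_multiples(B,C,m) < A:
--             s = m + 1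
--         else:
--             if m%B == 0 or m%C == 0:
--                 return m % (10**9+7)
--             else:
--                 e = m - 1
-- ===== SOURCE B (Python) =====
-- def solve(A, B, C):
--     # period reduction: L = lcm(B, C); per = magical numbers per period (0, L];
--     # then lower-bound binary search for the (r+1)-th magical number inside one period
--     g, h = B, C
--     while h:
--         g, h = h, g % h
--     L = B // g * C
--     per = L // B + L // C - 1
--     q, r = divmod(A - 1, per)
--     lo, hi = 1, L
--     while lo < hi:
--         mid = (lo + hi) // 2
--         if mid // B + mid // C - mid // L >= r + 1:
--             hi = mid
--         else:
--             lo = mid + 1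
--     return (q * L + lo) % (10 ** 9 + 7)
-- ===== Notes on version B (the rewrite author's own statement) =====
-- stated objective: alternative
-- what changed: Instead of A's three-way binary search over the whole range [min(B,C), min(B,C)*A], B reduces the problem by periodicity with L = lcm(B,C) (q, r = divmod(A-1, per) with per = L//B + L//C - 1 magical numbers per period) and then lower-bound binary-searches for the (r+1)-th magical number inside the single period (0, L].
-- outside the precondition, e.g. on solve(0, 2, 3): A returns None, B returns 0; on solve(-2, -19, 6): A returns 999999995, B returns 1
import Mathlib
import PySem

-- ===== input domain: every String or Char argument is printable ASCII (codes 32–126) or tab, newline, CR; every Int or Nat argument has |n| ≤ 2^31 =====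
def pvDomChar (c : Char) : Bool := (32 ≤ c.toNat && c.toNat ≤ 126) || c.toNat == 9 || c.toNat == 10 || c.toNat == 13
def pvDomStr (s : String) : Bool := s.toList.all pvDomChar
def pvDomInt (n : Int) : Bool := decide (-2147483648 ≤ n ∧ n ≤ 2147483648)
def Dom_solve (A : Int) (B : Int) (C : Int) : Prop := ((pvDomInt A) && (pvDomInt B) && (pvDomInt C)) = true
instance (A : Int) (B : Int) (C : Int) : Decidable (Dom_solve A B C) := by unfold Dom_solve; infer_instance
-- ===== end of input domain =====

-- B replaces A's three-way binary search over [min(B,C), min(B,C)*A] by a period reduction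
-- via L = lcm(B,C) followed by a lower-bound binary search inside one period (alternative algorithm).


-- ===== PORT A =====
-- A's inner recursive gcd (Python `%` = PySem.Int.mod, sign of the divisor)
def pvGcdA (a b : Int) : Int :=
  if h : b = 0 then a else pvGcdA b (PySem.Int.mod a b)
termination_by b.natAbs
decreasing_by
  rcases lt_trichotomy b 0 with hb | hb | hb
  · have := PySem.Int.mod_neg_bounds a hb; omega
  · exact absurd hb h
  · have h1 := PySem.Int.mod_nonneg a hb
    have h2 := PySem.Int.mod_lt a hb
    omega

def pvLcmA (a b : Int) : Int := PySem.Int.floordiv (a * b) (pvGcdA a b)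

def pvCntA (a b k : Int) : Int :=
  PySem.Int.floordiv k a + PySem.Int.floordiv k b - PySem.Int.floordiv k (pvLcmA a b)

-- A's while loop; the fallthrough (Python: return None) is the `else 0` branch, excluded by Pre_solve
def pvLoopA (Bv Cv Av s e : Int) : Int :=
  if h : s ≤ e then
    let m := PySem.Int.floordiv (s + e) 2
    if pvCntA Bv Cv m > Av then pvLoopA Bv Cv Av s (m - 1)
    else if pvCntA Bv Cv m < Av then pvLoopA Bv Cv Av (m + 1) e
    else if PySem.Int.mod m Bv = 0 ∨ PySem.Int.mod m Cv = 0 then PySem.Int.mod m (10 ^ 9 + 7)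
    else pvLoopA Bv Cv Av s (m - 1)
  else 0
termination_by (e + 1 - s).toNat
decreasing_by
  · have := PySem.Int.floordiv_two_mid_bounds h; omega
  · have := PySem.Int.floordiv_two_mid_bounds h; omega
  · have := PySem.Int.floordiv_two_mid_bounds h; omega

def solve (A : Int) (B : Int) (C : Int) : Int :=
  pvLoopA B C A (min B C) (min B C * A)

-- ===== PORT B =====
-- Source B's iterative gcd loop `while h: g, h = h, g % h`
def pvGcdB (g h : Int) : Int :=
  if hh : h = 0 then g else pvGcdB h (PySem.Int.mod g h)
termination_by h.natAbs
decreasing_by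
  rcases lt_trichotomy h 0 with hb | hb | hb
  · have := PySem.Int.mod_neg_bounds g hb; omega
  · exact absurd hb hh
  · have h1 := PySem.Int.mod_nonneg g hb
    have h2 := PySem.Int.mod_lt g hb
    omega

-- Source B's lower-bound search: first x in [lo, hi] with x//B + x//C - x//L ≥ t
def pvLoopB (Bv Cv L t lo hi : Int) : Int :=
  if h : lo < hi then
    let mid := PySem.Int.floordiv (lo + hi) 2
    if PySem.Int.floordiv mid Bv + PySem.Int.floordiv mid Cv - PySem.Int.floordiv mid L ≥ t then
      pvLoopB Bv Cv L t lo mid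
    else
      pvLoopB Bv Cv L t (mid + 1) hi
  else lo
termination_by (hi - lo).toNat
decreasing_by
  · have h1 := PySem.Int.floordiv_two_mid_bounds (le_of_lt h)
    have h2 : PySem.Int.floordiv (lo + hi) 2 < hi := by
      rw [PySem.Int.floordiv_lt_iff_lt_mul (by omega : (0:Int) < 2)]; omega
    omega
  · have h1 := PySem.Int.floordiv_two_mid_bounds (le_of_lt h)
    omega

def solve_alt (A : Int) (B : Int) (C : Int) : Int :=
  let g := pvGcdB B C
  let L := PySem.Int.floordiv B g * C
  let per := PySem.Int.floordiv L B + PySem.Int.floordiv L C - 1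
  match PySem.Int.divmod? (A - 1) per with
  | none => 0
  | some (q, r) =>
    let lo := pvLoopB B C L (r + 1) 1 L
    PySem.Int.mod (q * L + lo) (10 ^ 9 + 7)

-- ===== PRECONDITION & SPEC =====
-- Pre_solve excludes inputs with A ≤ 0 (A's loop never runs and it falls through returning None,
-- not an int) and with B ≤ 0 or C ≤ 0 (A raises ZeroDivisionError when B = C = 0 or lcm = 0, and
-- otherwise returns an accidental value of its search over a negative range).
def Pre_solve (A : Int) (B : Int) (C : Int) : Prop := 1 ≤ A ∧ 1 ≤ B ∧ 1 ≤ C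
instance (A : Int) (B : Int) (C : Int) : Decidable (Pre_solve A B C) := by
  unfold Pre_solve; infer_instance
def pvWitness_solve : Int × Int × Int := (5, 2, 3)

def Spec_solve (A : Int) (B : Int) (C : Int) (out : Int) : Prop := out = solve_alt A B C
instance (A : Int) (B : Int) (C : Int) (out : Int) : Decidable (Spec_solve A B C out) := by
  unfold Spec_solve; infer_instance

-- ===== CLAIM (what is proved, stated in full; the proofs are below) =====
def Claim_equal_solve : Prop :=
  ∀ (A : Int) (B : Int) (C : Int), Dom_solve A B C → Pre_solve A B C →
    Spec_solve A B C (solve A B C)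

-- ===== LEMMAS AND PROOFS =====

-- number of multiples of B or C in (0, x] when L = lcm B C (proof-side characterisation)
def pvCnt (B C L x : Int) : Int := x / B + x / C - x / L

-- least x ≥ 1 with pvCnt ≥ T
def pvIsLeast (B C L T m : Int) : Prop :=
  1 ≤ m ∧ T ≤ pvCnt B C L m ∧ ∀ x, 1 ≤ x → T ≤ pvCnt B C L x → m ≤ x

theorem pv_jump (d x : Int) (hd : 0 < d) :
    x / d = (x - 1) / d + (if d ∣ x then 1 else 0) := by
  have h0 := Int.mul_ediv_add_emod x d
  have h1 := Int.emod_nonneg x (ne_of_gt hd)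
  have h2 := Int.emod_lt_of_pos x hd
  by_cases hdvd : d ∣ x
  · simp only [hdvd, if_pos]
    have hr : x % d = 0 := Int.emod_eq_zero_of_dvd hdvd
    have hx : x - 1 = d * (x / d - 1) + (d - 1) := by linarith
    rw [hx, Int.mul_add_ediv_left _ _ (ne_of_gt hd)]
    have hz : (d - 1) / d = 0 := Int.ediv_eq_zero_of_lt (by omega) (by omega)
    linarith
  · simp only [hdvd, if_neg, not_false_iff, add_zero]
    have hr : 0 < x % d := by
      rcases lt_or_eq_of_le h1 with h | h
      · exact h
      · exact absurd (Int.dvd_of_emod_eq_zero h.symm) hdvd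
    have hx : x - 1 = d * (x / d) + (x % d - 1) := by linarith
    rw [hx, Int.mul_add_ediv_left _ _ (ne_of_gt hd)]
    have hz : (x % d - 1) / d = 0 := Int.ediv_eq_zero_of_lt (by omega) (by omega)
    linarith

theorem pvCnt_succ (B C L x : Int) (hB : 0 < B) (hC : 0 < C) (hL : 0 < L)
    (hBL : B ∣ L) (hCL : C ∣ L) (hU : ∀ y : Int, B ∣ y → C ∣ y → L ∣ y) :
    pvCnt B C L x = pvCnt B C L (x - 1) + (if B ∣ x ∨ C ∣ x then 1 else 0) := by
  unfold pvCnt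
  rw [pv_jump B x hB, pv_jump C x hC, pv_jump L x hL]
  by_cases hb : B ∣ x <;> by_cases hc : C ∣ x
  · have hl : L ∣ x := hU x hb hc
    simp only [hb, hc, hl, if_pos, true_or]; ring
  · have hl : ¬ L ∣ x := fun h => hc (dvd_trans hCL h)
    simp only [hb, hc, hl, if_pos, if_neg, not_false_iff, true_or]; ring
  · have hl : ¬ L ∣ x := fun h => hb (dvd_trans hBL h)
    simp only [hb, hc, hl, if_pos, if_neg, not_false_iff, or_true]; ring
  · have hl : ¬ L ∣ x := fun h => hb (dvd_trans hBL h)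
    simp only [hb, hc, hl, if_neg, not_false_iff, or_self]; ring

theorem pvCnt_zero (B C L : Int) : pvCnt B C L 0 = 0 := by
  unfold pvCnt; simp

theorem pvCnt_add_nat (B C L x : Int) (n : Nat) (hB : 0 < B) (hC : 0 < C) (hL : 0 < L)
    (hBL : B ∣ L) (hCL : C ∣ L) (hU : ∀ y : Int, B ∣ y → C ∣ y → L ∣ y) :
    pvCnt B C L x ≤ pvCnt B C L (x + n) := by
  induction n with
  | zero => simp
  | succ k ih =>
    have h := pvCnt_succ B C L (x + k + 1) hB hC hL hBL hCL hU
    have : (x : Int) + (k + 1 : Nat) = (x + k + 1) := by push_cast; ring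
    rw [this]
    have hk : x + (k : Int) + 1 - 1 = x + k := by ring
    rw [hk] at h
    split_ifs at h <;> push_cast at ih ⊢ <;> omega

theorem pvCnt_mono (B C L x y : Int) (hB : 0 < B) (hC : 0 < C) (hL : 0 < L)
    (hBL : B ∣ L) (hCL : C ∣ L) (hU : ∀ y : Int, B ∣ y → C ∣ y → L ∣ y)
    (hxy : x ≤ y) : pvCnt B C L x ≤ pvCnt B C L y := by
  have h := pvCnt_add_nat B C L x (y - x).toNat hB hC hL hBL hCL hU
  rw [Int.toNat_of_nonneg (show (0:Int) ≤ y - x by omega)] at h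
  rwa [show x + (y - x) = y from by ring] at h

theorem pvCnt_nonpos (B C L x : Int) (hB : 0 < B) (hC : 0 < C) (hL : 0 < L)
    (hBL : B ∣ L) (hCL : C ∣ L) (hU : ∀ y : Int, B ∣ y → C ∣ y → L ∣ y)
    (hx : x ≤ 0) : pvCnt B C L x ≤ 0 := by
  have := pvCnt_mono B C L x 0 hB hC hL hBL hCL hU hx
  rwa [pvCnt_zero] at this

-- derived properties of the least solution
theorem pvIsLeast_pred (B C L T m : Int) (hB : 0 < B) (hC : 0 < C) (hL : 0 < L)
    (hBL : B ∣ L) (hCL : C ∣ L) (hU : ∀ y : Int, B ∣ y → C ∣ y → L ∣ y)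
    (hT : 1 ≤ T) (hm : pvIsLeast B C L T m) : pvCnt B C L (m - 1) < T := by
  obtain ⟨hm1, hm2, hm3⟩ := hm
  by_cases h : m - 1 ≤ 0
  · have := pvCnt_nonpos B C L (m - 1) hB hC hL hBL hCL hU h; omega
  · by_contra hcon
    have := hm3 (m - 1) (by omega) (by omega)
    omega

theorem pvIsLeast_exact (B C L T m : Int) (hB : 0 < B) (hC : 0 < C) (hL : 0 < L)
    (hBL : B ∣ L) (hCL : C ∣ L) (hU : ∀ y : Int, B ∣ y → C ∣ y → L ∣ y)
    (hT : 1 ≤ T) (hm : pvIsLeast B C L T m) :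
    pvCnt B C L m = T ∧ (B ∣ m ∨ C ∣ m) := by
  have hpred := pvIsLeast_pred B C L T m hB hC hL hBL hCL hU hT hm
  obtain ⟨hm1, hm2, _⟩ := hm
  have hstep := pvCnt_succ B C L m hB hC hL hBL hCL hU
  split_ifs at hstep with hdvd
  · exact ⟨by omega, hdvd⟩
  · omega

theorem pvIsLeast_lt (B C L T m x : Int) (hB : 0 < B) (hC : 0 < C) (hL : 0 < L)
    (hBL : B ∣ L) (hCL : C ∣ L) (hU : ∀ y : Int, B ∣ y → C ∣ y → L ∣ y)
    (hT : 1 ≤ T) (hm : pvIsLeast B C L T m) (hx : x < m) : pvCnt B C L x < T := by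
  have hpred := pvIsLeast_pred B C L T m hB hC hL hBL hCL hU hT hm
  have := pvCnt_mono B C L x (m - 1) hB hC hL hBL hCL hU (by omega)
  omega

theorem pvIsLeast_unique (B C L T m x : Int) (hB : 0 < B) (hC : 0 < C) (hL : 0 < L)
    (hBL : B ∣ L) (hCL : C ∣ L) (hU : ∀ y : Int, B ∣ y → C ∣ y → L ∣ y)
    (hT : 1 ≤ T) (hm : pvIsLeast B C L T m)
    (hx1 : 1 ≤ x) (hxc : pvCnt B C L x = T) (hxd : B ∣ x ∨ C ∣ x) : x = m := by
  obtain ⟨hm1, hm2, hm3⟩ := hm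
  have hle : m ≤ x := hm3 x hx1 (le_of_eq hxc.symm)
  rcases eq_or_lt_of_le hle with h | h
  · exact h.symm
  · exfalso
    have hstep := pvCnt_succ B C L x hB hC hL hBL hCL hU
    rw [if_pos hxd] at hstep
    have := pvCnt_mono B C L m (x - 1) hB hC hL hBL hCL hU (by omega)
    omega

theorem pvLeast_exists (B C L T e : Int) (hB : 0 < B) (hC : 0 < C) (hL : 0 < L)
    (hBL : B ∣ L) (hCL : C ∣ L) (hU : ∀ y : Int, B ∣ y → C ∣ y → L ∣ y)
    (hT : 1 ≤ T) (he : 1 ≤ e) (hce : T ≤ pvCnt B C L e) :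
    ∃ m, pvIsLeast B C L T m ∧ m ≤ e := by
  have hex : ∃ n : Nat, T ≤ pvCnt B C L (n : Int) :=
    ⟨e.toNat, by rwa [Int.toNat_of_nonneg (by omega)]⟩
  refine ⟨(Nat.find hex : Int), ⟨?_, Nat.find_spec hex, ?_⟩, ?_⟩
  · by_contra h
    have h0 : Nat.find hex = 0 := by omega
    have := Nat.find_spec hex
    rw [h0] at this
    simp only [Nat.cast_zero, pvCnt_zero] at this
    omega
  · intro x hx1 hxc
    have : Nat.find hex ≤ x.toNat :=
      Nat.find_min' hex (by rwa [Int.toNat_of_nonneg (by omega)])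
    omega
  · have : Nat.find hex ≤ e.toNat :=
      Nat.find_min' hex (by rwa [Int.toNat_of_nonneg (by omega)])
    omega

-- periodicity
theorem pvCnt_period (B C L q t : Int) (hB : 0 < B) (hC : 0 < C) (hL : 0 < L)
    (hBL : B ∣ L) (hCL : C ∣ L) :
    pvCnt B C L (q * L + t) = q * (L / B + L / C - 1) + pvCnt B C L t := by
  obtain ⟨u, hu⟩ := hBL
  obtain ⟨v, hv⟩ := hCL
  unfold pvCnt
  have h1 : (q * L + t) / B = q * u + t / B := by
    rw [show q * L + t = B * (q * u) + t by rw [hu]; ring,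
        Int.mul_add_ediv_left _ _ (ne_of_gt hB)]
  have h2 : (q * L + t) / C = q * v + t / C := by
    rw [show q * L + t = C * (q * v) + t by rw [hv]; ring,
        Int.mul_add_ediv_left _ _ (ne_of_gt hC)]
  have h3 : (q * L + t) / L = q + t / L := by
    rw [show q * L + t = L * q + t by ring,
        Int.mul_add_ediv_left _ _ (ne_of_gt hL)]
  have h4 : L / B = u := by rw [hu, Int.mul_ediv_cancel_left _ (ne_of_gt hB)]
  have h5 : L / C = v := by rw [hv, Int.mul_ediv_cancel_left _ (ne_of_gt hC)]
  rw [h1, h2, h3, h4, h5]; ring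

-- antitone in the divisor, for a nonneg numerator
theorem pv_ediv_anti (x c d : Int) (hx : 0 ≤ x) (hc : 0 < c) (hcd : c ≤ d) :
    x / d ≤ x / c := by
  rw [Int.le_ediv_iff_mul_le hc]
  have h0 := Int.mul_ediv_add_emod x d
  have h1 := Int.emod_nonneg x (by omega : d ≠ 0)
  have hq : 0 ≤ x / d := Int.ediv_nonneg hx (by omega)
  nlinarith

-- the Euclid recursions compute Int.gcd on nonnegative inputs
theorem pvGcdA_eq_gcd (n : Nat) (a b : Int) (hn : b.natAbs ≤ n) (ha : 0 ≤ a) (hb : 0 ≤ b) :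
    pvGcdA a b = (Int.gcd a b : Int) := by
  induction n generalizing a b with
  | zero =>
    have hb0 : b = 0 := by omega
    subst hb0
    rw [pvGcdA]
    simp [Int.gcd, Int.natAbs_of_nonneg ha]
  | succ k ih =>
    by_cases hb0 : b = 0
    · subst hb0
      rw [pvGcdA]
      simp [Int.gcd, Int.natAbs_of_nonneg ha]
    · have hbp : 0 < b := by omega
      rw [pvGcdA, dif_neg hb0, PySem.Int.mod_eq_emod_of_pos hbp]
      have h1 := Int.emod_nonneg a hb0
      have h2 := Int.emod_lt_of_pos a hbp
      rw [ih b (a % b) (by omega) hb h1]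
      congr 1
      unfold Int.gcd
      have hab : (a % b).natAbs = a.natAbs % b.natAbs := by
        rw [Int.natAbs_emod a hb0, if_pos (Or.inl ha)]
      rw [hab, Nat.gcd_comm b.natAbs _, ← Nat.gcd_rec, Nat.gcd_comm]

theorem pvGcdB_eq_pvGcdA (n : Nat) (a b : Int) (hn : b.natAbs ≤ n) :
    pvGcdB a b = pvGcdA a b := by
  induction n generalizing a b with
  | zero =>
    have hb0 : b = 0 := by omega
    subst hb0
    rw [pvGcdB, pvGcdA]; simp
  | succ k ih =>
    by_cases hb0 : b = 0
    · subst hb0; rw [pvGcdB, pvGcdA]; simp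
    · rw [pvGcdB, pvGcdA, dif_neg hb0, dif_neg hb0]
      apply ih
      rcases lt_trichotomy b 0 with hbn | hbz | hbp
      · have := PySem.Int.mod_neg_bounds a hbn; omega
      · exact absurd hbz hb0
      · have h1 := PySem.Int.mod_nonneg a hbp
        have h2 := PySem.Int.mod_lt a hbp
        omega

-- A's binary search returns the least magical number (mod 1e9+7)
theorem pvLoopA_eq (B C L Av m : Int) (hB : 0 < B) (hC : 0 < C) (hL : 0 < L)
    (hBL : B ∣ L) (hCL : C ∣ L) (hU : ∀ y : Int, B ∣ y → C ∣ y → L ∣ y)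
    (hA1 : 1 ≤ Av) (hm : pvIsLeast B C L Av m) (hlcm : pvLcmA B C = L) :
    ∀ (n : Nat) (s e : Int), (e + 1 - s).toNat ≤ n → 1 ≤ s → s ≤ m → m ≤ e →
      pvLoopA B C Av s e = PySem.Int.mod m (10 ^ 9 + 7) := by
  have hcx : ∀ x : Int, pvCntA B C x = pvCnt B C L x := by
    intro x
    unfold pvCntA pvCnt
    rw [hlcm, PySem.Int.floordiv_eq_ediv_of_pos hB, PySem.Int.floordiv_eq_ediv_of_pos hC,
        PySem.Int.floordiv_eq_ediv_of_pos hL]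
  intro n
  induction n with
  | zero => intro s e hn hs hsm hme; omega
  | succ k ih =>
    intro s e hn hs hsm hme
    have hse : s ≤ e := le_trans hsm hme
    have hmid := PySem.Int.floordiv_two_mid_bounds hse
    rw [pvLoopA, dif_pos hse]
    simp only [hcx]
    set md := PySem.Int.floordiv (s + e) 2 with hmd
    split_ifs with h1 h2 h3
    · -- cnt md > Av : m ≤ md - 1
      have hmle : m ≤ md := hm.2.2 md (by omega) (by omega)
      have hne : m ≠ md := by
        intro h; rw [← h] at h1
        have := (pvIsLeast_exact B C L Av m hB hC hL hBL hCL hU hA1 hm).1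
        omega
      exact ih s (md - 1) (by omega) hs hsm (by omega)
    · -- cnt md < Av : md < m
      have : md < m := by
        by_contra hcon
        have := pvCnt_mono B C L m md hB hC hL hBL hCL hU (by omega)
        have := hm.2.1
        omega
      exact ih (md + 1) e (by omega) (by omega) (by omega) hme
    · -- cnt md = Av and divisible : md = m
      have hd : B ∣ md ∨ C ∣ md := by
        rcases h3 with h | h
        · exact Or.inl ((PySem.Int.mod_eq_zero_iff_dvd md B).mp h)
        · exact Or.inr ((PySem.Int.mod_eq_zero_iff_dvd md C).mp h)
      have : md = m :=
        pvIsLeast_unique B C L Av m md hB hC hL hBL hCL hU hA1 hm (by omega) (by omega) hd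
      rw [this]
    · -- cnt md = Av, not divisible : m < md, so m ≤ md - 1
      have hmle : m ≤ md := hm.2.2 md (by omega) (by omega)
      have hne : m ≠ md := by
        intro h
        have := (pvIsLeast_exact B C L Av m hB hC hL hBL hCL hU hA1 hm).2
        rw [h] at this
        rcases this with hdv | hdv
        · exact h3 (Or.inl ((PySem.Int.mod_eq_zero_iff_dvd md B).mpr hdv))
        · exact h3 (Or.inr ((PySem.Int.mod_eq_zero_iff_dvd md C).mpr hdv))
      exact ih s (md - 1) (by omega) hs hsm (by omega)

-- B's lower-bound search returns the least x in [lo, hi] with cnt ≥ t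
theorem pvLoopB_eq (B C L T y : Int) (hB : 0 < B) (hC : 0 < C) (hL : 0 < L)
    (hBL : B ∣ L) (hCL : C ∣ L) (hU : ∀ y : Int, B ∣ y → C ∣ y → L ∣ y)
    (hT1 : 1 ≤ T) (hy : pvIsLeast B C L T y) :
    ∀ (n : Nat) (lo hi : Int), (hi - lo).toNat ≤ n → 1 ≤ lo → lo ≤ y → y ≤ hi →
      pvLoopB B C L T lo hi = y := by
  intro n
  induction n with
  | zero =>
    intro lo hi hn h1 h2 h3
    rw [pvLoopB, dif_neg (by omega : ¬ lo < hi)]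
    omega
  | succ k ih =>
    intro lo hi hn h1 h2 h3
    by_cases hlt : lo < hi
    · have hmid := PySem.Int.floordiv_two_mid_bounds (le_of_lt hlt)
      have hmlt : PySem.Int.floordiv (lo + hi) 2 < hi := by
        rw [PySem.Int.floordiv_lt_iff_lt_mul (by omega : (0:Int) < 2)]; omega
      rw [pvLoopB, dif_pos hlt]
      set md := PySem.Int.floordiv (lo + hi) 2 with hmd
      have hcnt : ∀ x : Int, PySem.Int.floordiv x B + PySem.Int.floordiv x C - PySem.Int.floordiv x L
          = pvCnt B C L x := by
        intro x
        unfold pvCnt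
        rw [PySem.Int.floordiv_eq_ediv_of_pos hB, PySem.Int.floordiv_eq_ediv_of_pos hC,
            PySem.Int.floordiv_eq_ediv_of_pos hL]
      simp only [hcnt]
      split_ifs with hge
      · have : y ≤ md := hy.2.2 md (by omega) hge
        exact ih lo md (by omega) h1 h2 this
      · have : md < y := by
          by_contra hcon
          have := pvCnt_mono B C L y md hB hC hL hBL hCL hU (by omega)
          have := hy.2.1
          omega
        exact ih (md + 1) hi (by omega) (by omega) (by omega) h3
    · rw [pvLoopB, dif_neg hlt]
      omega

-- ===== VERDICT (by name: the statement is the Claim_ definition above) =====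
theorem solve_spec : Claim_equal_solve := by
  intro A B C hDom hPre
  obtain ⟨hA, hB, hC⟩ := hPre
  unfold Spec_solve
  -- gcd and lcm facts
  have hgA : pvGcdA B C = (Int.gcd B C : Int) :=
    pvGcdA_eq_gcd C.natAbs B C le_rfl (by omega) (by omega)
  have hgB : pvGcdB B C = (Int.gcd B C : Int) := by
    rw [pvGcdB_eq_pvGcdA C.natAbs B C le_rfl, hgA]
  have hg0 : (0 : Int) < (Int.gcd B C : Int) := by
    have : Int.gcd B C ≠ 0 := by
      intro h0
      rw [Int.gcd_eq_zero_iff] at h0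
      omega
    exact_mod_cast Nat.pos_of_ne_zero this
  have hgl : (Int.gcd B C : Int) * (Int.lcm B C : Int) = B * C := by
    have h := congrArg (fun n : Nat => (n : Int)) (Int.gcd_mul_lcm B C)
    push_cast at h
    rwa [abs_of_nonneg (by omega : (0:Int) ≤ B), abs_of_nonneg (by omega : (0:Int) ≤ C)] at h
  have hL0 : (0 : Int) < (Int.lcm B C : Int) := by nlinarith
  have hBL : B ∣ (Int.lcm B C : Int) := Int.dvd_lcm_left B C
  have hCL : C ∣ (Int.lcm B C : Int) := Int.dvd_lcm_right B C
  have hU : ∀ y : Int, B ∣ y → C ∣ y → (Int.lcm B C : Int) ∣ y :=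
    fun y h1 h2 => Int.coe_lcm_dvd h1 h2
  have hlcmA : pvLcmA B C = (Int.lcm B C : Int) := by
    unfold pvLcmA
    rw [hgA, PySem.Int.floordiv_eq_ediv_of_pos hg0, ← hgl,
        Int.mul_ediv_cancel_left _ (ne_of_gt hg0)]
  have hLB : PySem.Int.floordiv B (Int.gcd B C : Int) * C = (Int.lcm B C : Int) := by
    rw [PySem.Int.floordiv_eq_ediv_of_pos hg0]
    have h3 : (Int.gcd B C : Int) * (B / (Int.gcd B C : Int) * C) =
        (Int.gcd B C : Int) * (Int.lcm B C : Int) := by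
      rw [← mul_assoc, Int.mul_ediv_cancel' (Int.gcd_dvd_left B C), hgl]
    exact mul_left_cancel₀ (ne_of_gt hg0) h3
  set Lv := (Int.lcm B C : Int) with hLvdef
  -- unfold B's port
  simp only [solve_alt, hgB, hLB, PySem.Int.floordiv_eq_ediv_of_pos hB,
    PySem.Int.floordiv_eq_ediv_of_pos hC]
  -- per = count of magical numbers per period
  have hperB : 1 ≤ Lv / B := by
    rw [Int.le_ediv_iff_mul_le hB, one_mul]
    exact Int.le_of_dvd hL0 hBL
  have hperC : 1 ≤ Lv / C := by
    rw [Int.le_ediv_iff_mul_le hC, one_mul]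
    exact Int.le_of_dvd hL0 hCL
  have hper1 : 1 ≤ Lv / B + Lv / C - 1 := by omega
  have hper_eq : Lv / B + Lv / C - 1 = pvCnt B C Lv Lv := by
    unfold pvCnt
    rw [Int.ediv_self (ne_of_gt hL0)]
  have hdm : PySem.Int.divmod? (A - 1) (Lv / B + Lv / C - 1) =
      some (PySem.Int.floordiv (A - 1) (Lv / B + Lv / C - 1),
            PySem.Int.mod (A - 1) (Lv / B + Lv / C - 1)) := by
    simp [PySem.Int.divmod?, PySem.Int.floordiv, PySem.Int.mod,
      show Lv / B + Lv / C - 1 ≠ 0 by omega]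
  rw [hdm]
  set q := PySem.Int.floordiv (A - 1) (Lv / B + Lv / C - 1) with hqdef
  set r := PySem.Int.mod (A - 1) (Lv / B + Lv / C - 1) with hrdef
  have hr0 : 0 ≤ r := PySem.Int.mod_nonneg _ (by omega)
  have hrlt : r < Lv / B + Lv / C - 1 := PySem.Int.mod_lt _ (by omega)
  have hqr : q * (Lv / B + Lv / C - 1) + r = A - 1 := by
    rw [hqdef, hrdef, PySem.Int.floordiv_eq_ediv_of_pos (by omega),
        PySem.Int.mod_eq_emod_of_pos (by omega)]
    have := Int.mul_ediv_add_emod (A - 1) (Lv / B + Lv / C - 1)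
    linarith
  have hq0 : 0 ≤ q := by
    rw [hqdef, PySem.Int.floordiv_eq_ediv_of_pos (by omega)]
    exact Int.ediv_nonneg (by omega) (by omega)
  -- the least magical number in one period, target r + 1
  obtain ⟨y, hy, hyLv⟩ := pvLeast_exists B C Lv (r + 1) Lv hB hC hL0 hBL hCL hU
    (by omega) (by omega) (by rw [← hper_eq]; omega)
  have hy1 : 1 ≤ y := hy.1
  have hloopB : pvLoopB B C Lv (r + 1) 1 Lv = y :=
    pvLoopB_eq B C Lv (r + 1) y hB hC hL0 hBL hCL hU (by omega) hy
      (Lv - 1).toNat 1 Lv le_rfl le_rfl hy1 hyLv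
  change solve A B C = PySem.Int.mod (q * Lv + pvLoopB B C Lv (r + 1) 1 Lv) (10 ^ 9 + 7)
  rw [hloopB]
  -- m = q * Lv + y is the least magical number for target A
  have hmL : pvIsLeast B C Lv A (q * Lv + y) := by
    refine ⟨by nlinarith, ?_, ?_⟩
    · have hp := pvCnt_period B C Lv q y hB hC hL0 hBL hCL
      have h2 := hy.2.1
      rw [hp]
      nlinarith
    · intro x hx1 hxA
      by_contra hcon
      push Not at hcon
      have hp0 : pvCnt B C Lv (q * Lv) = q * (Lv / B + Lv / C - 1) := by
        have := pvCnt_period B C Lv q 0 hB hC hL0 hBL hCL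
        rwa [add_zero, pvCnt_zero, add_zero] at this
      rcases le_or_gt x (q * Lv) with hle | hgt
      · have hmono := pvCnt_mono B C Lv x (q * Lv) hB hC hL0 hBL hCL hU hle
        rw [hp0] at hmono
        linarith
      · have hp := pvCnt_period B C Lv q (x - q * Lv) hB hC hL0 hBL hCL
        rw [show q * Lv + (x - q * Lv) = x from by ring] at hp
        have hlt := pvIsLeast_lt B C Lv (r + 1) y (x - q * Lv) hB hC hL0 hBL hCL hU
          (by omega) hy (by omega)
        linarith
  -- A's search range brackets m
  have hm1 : 1 ≤ q * Lv + y := hmL.1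
  have hmagic := pvIsLeast_exact B C Lv A (q * Lv + y) hB hC hL0 hBL hCL hU (by omega) hmL
  have hs0 : min B C ≤ q * Lv + y := by
    rcases hmagic.2 with hd | hd
    · have := Int.le_of_dvd (by omega) hd; omega
    · have := Int.le_of_dvd (by omega) hd; omega
  have hmin1 : 1 ≤ min B C := by omega
  have he0m : q * Lv + y ≤ min B C * A := by
    apply hmL.2.2
    · nlinarith
    · rcases le_total B C with h | h
      · rw [min_eq_left h]
        have h1 : B * A / B = A := by
          rw [mul_comm, Int.mul_ediv_cancel _ (ne_of_gt hB)]
        have h2 : B * A / Lv ≤ B * A / C :=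
          pv_ediv_anti (B * A) C Lv (by positivity) hC (Int.le_of_dvd hL0 hCL)
        unfold pvCnt
        omega
      · rw [min_eq_right h]
        have h1 : C * A / C = A := by
          rw [mul_comm, Int.mul_ediv_cancel _ (ne_of_gt hC)]
        have h2 : C * A / Lv ≤ C * A / B :=
          pv_ediv_anti (C * A) B Lv (by positivity) hB (Int.le_of_dvd hL0 hBL)
        unfold pvCnt
        omega
  have hloopA := pvLoopA_eq B C Lv A (q * Lv + y) hB hC hL0 hBL hCL hU hA hmL hlcmA
    (min B C * A + 1 - min B C).toNat (min B C) (min B C * A) le_rfl hmin1 hs0 he0m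
  unfold solve
  rw [hloopA]
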